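-- pv_equiv track=rewrite | github.com/Bekreth/advent_of_code | 2023/day_14/solution.py | tip_horizontal
-- ===== SOURCE A (Python) =====
-- def tip_horizontal(input_map, reverse):
--     updated_map = []
--     reference_map = []
--     if reverse:
--         reference_map = [list(reversed(r)) for r in input_map]
--     else:
--         reference_map = input_map
--     for i, row in enumerate(reference_map):
--         updated_row = [c if c != "O" else "."  for c in row]
--         updated_map += [updated_row]
--         for j, column in enumerate(row):
--             if column == "O":
--                 k = j - 1
--                 while k >= -1:
--                     if k == -1:
--                         updated_map[i][0] = "O"
--                     elif updated_map[i][k] != ".":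
--                         updated_map[i][k + 1] = "O"
--                         break
--                     k -= 1
--     if reverse:
--         return [list(reversed(r)) for r in updated_map]
--     else:
--         return updated_map
-- ===== SOURCE B (Python) =====
-- def tip_horizontal(input_map, reverse):
--     # Single pass per row: count 'O's and total cells of each wall-delimited
--     # segment, then emit the segment as all 'O's followed by all '.'s.
--     result = []
--     for row in input_map:
--         r = list(reversed(row)) if reverse else row
--         out = []
--         seg_len = 0
--         seg_os = 0
--         for c in r:
--             if c == "O":
--                 seg_len += 1
--                 seg_os += 1
--             elif c == ".":
--                 seg_len += 1
--             else:
--                 out.extend(["O"] * seg_os + ["."] * (seg_len - seg_os))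
--                 out.append(c)
--                 seg_len = 0
--                 seg_os = 0
--         out.extend(["O"] * seg_os + ["."] * (seg_len - seg_os))
--         result.append(list(reversed(out)) if reverse else out)
--     return result
-- ===== Notes on version B (the rewrite author's own statement) =====
-- stated objective: alternative
-- what changed: A re-scans backwards through the already-updated row for every rock it moves; B instead makes a single counting pass per row, tallying rocks and cells of each wall-delimited segment and emitting the segment as rocks followed by dots.
import Mathlib
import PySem

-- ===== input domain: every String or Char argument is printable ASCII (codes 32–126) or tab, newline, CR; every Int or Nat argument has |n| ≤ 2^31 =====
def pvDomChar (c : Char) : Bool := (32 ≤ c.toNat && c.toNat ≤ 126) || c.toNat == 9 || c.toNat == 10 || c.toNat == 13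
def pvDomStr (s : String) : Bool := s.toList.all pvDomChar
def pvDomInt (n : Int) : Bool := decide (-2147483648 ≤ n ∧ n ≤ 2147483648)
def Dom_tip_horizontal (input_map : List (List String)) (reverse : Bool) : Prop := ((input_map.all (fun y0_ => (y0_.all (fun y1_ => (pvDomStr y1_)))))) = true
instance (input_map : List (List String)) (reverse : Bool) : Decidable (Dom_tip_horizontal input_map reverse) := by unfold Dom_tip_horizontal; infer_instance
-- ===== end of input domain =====

-- B replaces A's per-rock backward scan with a single pass per row that counts each
-- wall-delimited segment's rocks and emits the segment directly (objective: alternative).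

-- ===== PORT A =====
-- A's inner `while k >= -1` loop.  The read `updated_map[i][k]` only happens with
-- 0 ≤ k < len(row) in A (k ≥ 0 in that branch, and k < j < len), so pyGetD with a
-- dummy default is exact there; pySetD is exact for the in-range indices 0 and k+1.
def tipWhileA (u : List String) (k : Int) : List String :=
  if k ≥ -1 then
    if k = -1 then tipWhileA (PySem.List.pySetD u 0 "O") (k - 1)
    else if PySem.List.pyGetD u k "." ≠ "." then
      PySem.List.pySetD u (k + 1) "O"
    else tipWhileA u (k - 1)
  else u
termination_by (k + 2).toNat
decreasing_by all_goals (simp_wf; omega)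

-- each outer iteration appends row i and then mutates only updated_map[i],
-- so the outer loop is ported row by row.
def tip_horizontal (input_map : List (List String)) (reverse : Bool) : List (List String) :=
  let reference_map := if reverse then input_map.map (fun r => r.reverse) else input_map
  let updated_map := reference_map.map (fun row =>
    let updated_row := row.map (fun c => if c = "O" then "." else c)
    (PySem.List.enumerate row).foldl
      (fun u jc => if jc.2 = "O" then tipWhileA u (jc.1 - 1) else u) updated_row)
  if reverse then updated_map.map (fun r => r.reverse) else updated_map

-- ===== PORT B =====
def tiltStepB (st : List String × Nat × Nat) (c : String) : List String × Nat × Nat :=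
  if c = "O" then (st.1, st.2.1 + 1, st.2.2 + 1)
  else if c = "." then (st.1, st.2.1 + 1, st.2.2)
  else (st.1 ++ List.replicate st.2.2 "O" ++ List.replicate (st.2.1 - st.2.2) "." ++ [c], 0, 0)

def tiltRowB (r : List String) : List String :=
  let st := r.foldl tiltStepB ([], 0, 0)
  st.1 ++ List.replicate st.2.2 "O" ++ List.replicate (st.2.1 - st.2.2) "."

def tip_horizontal_alt (input_map : List (List String)) (reverse : Bool) : List (List String) :=
  input_map.map (fun row =>
    let r := if reverse then row.reverse else row
    let out := tiltRowB r
    if reverse then out.reverse else out)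

-- ===== PRECONDITION & SPEC =====
def Spec_tip_horizontal (input_map : List (List String)) (reverse : Bool) (out : List (List String)) : Prop := out = tip_horizontal_alt input_map reverse
instance (input_map : List (List String)) (reverse : Bool) (out : List (List String)) : Decidable (Spec_tip_horizontal input_map reverse out) := by unfold Spec_tip_horizontal; infer_instance

-- ===== CLAIM (what is proved, stated in full; the proofs are below) =====
def Claim_equal_tip_horizontal : Prop := ∀ (input_map : List (List String)) (reverse : Bool), Dom_tip_horizontal input_map reverse → Spec_tip_horizontal input_map reverse (tip_horizontal input_map reverse)

-- ===== LEMMAS AND PROOFS =====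

theorem getD_app0 (xs : List String) (y : String) (ys : List String) (d : String) :
    (xs ++ y :: ys).getD xs.length d = y := by
  induction xs with
  | nil => simp
  | cons x xs ih => simpa using ih

theorem set_app0 (xs : List String) (y : String) (ys : List String) (v : String) :
    (xs ++ y :: ys).set xs.length v = xs ++ v :: ys := by
  induction xs with
  | nil => simp
  | cons x xs ih => simp [ih]

-- A's backward scan over `out ++ O^a ++ .^b ++ "." :: rest`, started just left of the
-- current rock (position |out|+a+b), drops the rock right after the O-block.
theorem tipWhileA_spec (b : Nat) : ∀ (a : Nat) (out rest : List String),
    (∀ l, out.getLast? = some l → l ≠ ".") →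
    tipWhileA (out ++ List.replicate a "O" ++ List.replicate b "." ++ "." :: rest)
      (((out.length + a + b : Nat) : Int) - 1)
    = out ++ List.replicate (a + 1) "O" ++ List.replicate b "." ++ rest := by
  induction b with
  | zero =>
    intro a out rest hout
    cases a with
    | zero =>
      rcases List.eq_nil_or_concat out with rfl | ⟨l, y, rfl⟩
      · -- out = [], a = b = 0 : k = -1, the rock is set at position 0
        norm_num
        rw [tipWhileA]
        norm_num
        rw [tipWhileA]
        norm_num
        rw [show (0 : Int) = ((0 : Nat) : Int) from rfl, PySem.List.pySetD_natCast]
        simp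
      · -- out = l ++ [y] : the scan hits the wall y at once, the rock stays put
        simp only [List.concat_eq_append] at *
        have hy : y ≠ "." := hout y (by simp)
        have hk : ((((l ++ [y]).length + 0 + 0 : Nat)) : Int) - 1 = ((l.length : Nat) : Int) := by
          simp
        rw [hk, tipWhileA]
        rw [if_pos (by omega : ((l.length : Nat) : Int) ≥ -1),
            if_neg (by omega : ¬ ((l.length : Nat) : Int) = -1)]
        have hu : (l ++ [y]) ++ List.replicate 0 "O" ++ List.replicate 0 "." ++ "." :: rest
            = l ++ y :: ("." :: rest) := by simp
        simp only [hu, PySem.List.pyGetD_natCast, getD_app0]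
        rw [if_pos hy]
        have h1 : ((l.length : Nat) : Int) + 1 = (((l ++ [y]).length : Nat) : Int) := by simp
        rw [h1, PySem.List.pySetD_natCast]
        rw [show l ++ y :: ("." :: rest) = (l ++ [y]) ++ "." :: rest from by simp, set_app0]
        simp
    | succ a' =>
      -- the scan hits the right end of the already settled O-block
      have hk : (((out.length + (a' + 1) + 0 : Nat)) : Int) - 1
          = (((out ++ List.replicate a' "O").length : Nat) : Int) := by
        simp; omega
      rw [hk, tipWhileA]
      rw [if_pos (by omega), if_neg (by omega)]
      have hu : out ++ List.replicate (a' + 1) "O" ++ List.replicate 0 "." ++ "." :: rest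
          = (out ++ List.replicate a' "O") ++ "O" :: ("." :: rest) := by
        simp [List.replicate_succ']
      simp only [hu, PySem.List.pyGetD_natCast, getD_app0]
      rw [if_pos (by decide : ("O" : String) ≠ ".")]
      have h1 : (((out ++ List.replicate a' "O").length : Nat) : Int) + 1
          = (((out ++ List.replicate (a' + 1) "O").length : Nat) : Int) := by
        simp; omega
      rw [h1, PySem.List.pySetD_natCast]
      rw [show (out ++ List.replicate a' "O") ++ "O" :: ("." :: rest)
            = (out ++ List.replicate (a' + 1) "O") ++ "." :: rest from by
          simp [List.replicate_succ'], set_app0]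
      simp [List.replicate_succ']
  | succ b' ih =>
    intro a out rest hout
    have hk : (((out.length + a + (b' + 1) : Nat)) : Int) - 1
        = (((out ++ List.replicate a "O" ++ List.replicate b' ".").length : Nat) : Int) := by
      simp; omega
    rw [hk, tipWhileA]
    rw [if_pos (by omega), if_neg (by omega)]
    have hu : out ++ List.replicate a "O" ++ List.replicate (b' + 1) "." ++ "." :: rest
        = (out ++ List.replicate a "O" ++ List.replicate b' ".") ++ "." :: ("." :: rest) := by
      simp [List.replicate_succ']
    simp only [hu, PySem.List.pyGetD_natCast, getD_app0]
    rw [if_neg (by simp)]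
    have hk2 : (((out ++ List.replicate a "O" ++ List.replicate b' ".").length : Nat) : Int) - 1
        = (((out.length + a + b' : Nat)) : Int) - 1 := by
      simp; omega
    rw [hk2]
    have H := ih a out ("." :: rest) hout
    rw [H]
    simp [List.replicate_succ']

-- Main invariant: after A has processed a prefix rendered as `out ++ O^a ++ .^d`,
-- running A's fold over the (dotified) suffix equals B's fold continued from
-- state (out, a+d, a) followed by B's final flush.
theorem foldA_runB (s : List String) : ∀ (out : List String) (a d : Nat),
    (∀ l, out.getLast? = some l → l ≠ ".") →
    (PySem.List.enumerate s ((out.length + a + d : Nat) : Int)).foldl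
        (fun u jc => if jc.2 = "O" then tipWhileA u (jc.1 - 1) else u)
        (out ++ List.replicate a "O" ++ List.replicate d "." ++
          s.map (fun c => if c = "O" then "." else c))
    = (let st := s.foldl tiltStepB (out, a + d, a)
       st.1 ++ List.replicate st.2.2 "O" ++ List.replicate (st.2.1 - st.2.2) ".") := by
  induction s with
  | nil =>
    intro out a d hout
    simp [PySem.List.enumerate]
  | cons c s' ih =>
    intro out a d hout
    rw [PySem.List.enumerate_cons, List.foldl_cons, List.foldl_cons, List.map_cons]
    by_cases hO : c = "O"
    · subst hO
      simp only [reduceIte]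
      have hw := tipWhileA_spec d a out (s'.map (fun c => if c = "O" then "." else c)) hout
      rw [hw]
      rw [show ((out.length + a + d : Nat) : Int) + 1
            = ((out.length + (a + 1) + d : Nat) : Int) from by push_cast; ring]
      rw [ih out (a + 1) d hout]
      have hst : tiltStepB (out, a + d, a) "O" = (out, a + 1 + d, a + 1) := by
        simp [tiltStepB]; omega
      rw [hst]
    · by_cases hD : c = "."
      · subst hD
        have hc : ¬ ("." : String) = "O" := by decide
        simp only [if_neg hc]
        have hu : out ++ List.replicate a "O" ++ List.replicate d "." ++
              "." :: s'.map (fun c => if c = "O" then "." else c)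
            = out ++ List.replicate a "O" ++ List.replicate (d + 1) "." ++
              s'.map (fun c => if c = "O" then "." else c) := by
          simp [List.replicate_succ']
        rw [hu]
        rw [show ((out.length + a + d : Nat) : Int) + 1
              = ((out.length + a + (d + 1) : Nat) : Int) from by push_cast; ring]
        rw [ih out a (d + 1) hout]
        have hst : tiltStepB (out, a + d, a) "." = (out, a + (d + 1), a) := by
          have hd : a + d + 1 = a + (d + 1) := by omega
          simp [tiltStepB, hd]
        rw [hst]
      · -- wall cell c: it closes the current segment
        rw [if_neg hO]
        rw [show (if c = "O" then "." else c) = c from by simp [hO]]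
        have hout' : ∀ l, (out ++ List.replicate a "O" ++ List.replicate d "." ++ [c]).getLast?
            = some l → l ≠ "." := by
          intro l hl
          have : (out ++ List.replicate a "O" ++ List.replicate d "." ++ [c]).getLast?
              = some c := by
            rw [show out ++ List.replicate a "O" ++ List.replicate d "." ++ [c]
                  = (out ++ List.replicate a "O" ++ List.replicate d ".") ++ [c] from by simp]
            exact List.getLast?_concat
          rw [this] at hl
          cases hl
          exact hD
        have hu : out ++ List.replicate a "O" ++ List.replicate d "." ++
              c :: s'.map (fun x => if x = "O" then "." else x)
            = (out ++ List.replicate a "O" ++ List.replicate d "." ++ [c]) ++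
              List.replicate 0 "O" ++ List.replicate 0 "." ++
              s'.map (fun x => if x = "O" then "." else x) := by
          simp
        rw [hu]
        rw [show ((out.length + a + d : Nat) : Int) + 1
              = (((out ++ List.replicate a "O" ++ List.replicate d "." ++ [c]).length
                  + 0 + 0 : Nat) : Int) from by simp; omega]
        rw [ih (out ++ List.replicate a "O" ++ List.replicate d "." ++ [c]) 0 0 hout']
        have hst : tiltStepB (out, a + d, a) c
            = (out ++ List.replicate a "O" ++ List.replicate d "." ++ [c], 0 + 0, 0) := by
          have hd : a + d - a = d := by omega
          simp [tiltStepB, hO, hD, hd]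
        rw [hst]

theorem tiltRow_eq (row : List String) :
    (PySem.List.enumerate row).foldl
        (fun u jc => if jc.2 = "O" then tipWhileA u (jc.1 - 1) else u)
        (row.map (fun c => if c = "O" then "." else c))
    = tiltRowB row := by
  have h := foldA_runB row [] 0 0 (by simp)
  simpa [tiltRowB, PySem.List.enumerate] using h

-- ===== VERDICT (by name: the statement is the Claim_ definition above) =====
theorem tip_horizontal_spec : Claim_equal_tip_horizontal := by
  intro input_map reverse _
  unfold Spec_tip_horizontal tip_horizontal tip_horizontal_alt
  cases reverse
  · simp only [Bool.false_eq_true, if_false]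
    exact List.map_congr_left fun row _ => tiltRow_eq row
  · simp only [eq_self_iff_true, if_true, ite_true, List.map_map]
    refine List.map_congr_left fun row _ => ?_
    simp only [Function.comp]
    exact congrArg List.reverse (tiltRow_eq row.reverse)
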